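-- pv_equiv track=rewrite | github.com/anonymousloger/Python | Charater match.py | MatchingCharacters
-- ===== SOURCE A (Python) =====
-- def MatchingCharacters(string):
--     cnt = [0]
--     for ind, char in enumerate(string):
--         curr_ind = ind + 1
--         while True:
--             try:
--                 new_ind = string.index(char,curr_ind)
--                 inner_string = string[ind+1:new_ind]
--                 cnt.append(len(set(inner_string)))
--                 curr_ind = new_ind + 1
--             except Exception:
--                 break
--
--     return max(cnt)
-- ===== SOURCE B (Python) =====
-- def MatchingCharacters(string):
--     # For each distinct char, the widest pair (first, last occurrence) maximizes
--     # the distinct-count between, so only those pairs need checking.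
--     fl = {}
--     for i, ch in enumerate(string):
--         if ch in fl:
--             fl[ch] = (fl[ch][0], i)
--         else:
--             fl[ch] = (i, i)
--     best = 0
--     for f, l in fl.values():
--         if f < l:
--             best = max(best, len(set(string[f + 1:l])))
--     return best
-- ===== Notes on version B (the rewrite author's own statement) =====
-- stated objective: faster
-- what changed: Instead of scanning, for every index, every later occurrence of the same character (all O(n^2) equal pairs, each with an O(n) distinct-count), B records first/last occurrence of each distinct character in one pass and counts distinct characters only between those widest pairs, which dominate all narrower ones.
import Mathlib
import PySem

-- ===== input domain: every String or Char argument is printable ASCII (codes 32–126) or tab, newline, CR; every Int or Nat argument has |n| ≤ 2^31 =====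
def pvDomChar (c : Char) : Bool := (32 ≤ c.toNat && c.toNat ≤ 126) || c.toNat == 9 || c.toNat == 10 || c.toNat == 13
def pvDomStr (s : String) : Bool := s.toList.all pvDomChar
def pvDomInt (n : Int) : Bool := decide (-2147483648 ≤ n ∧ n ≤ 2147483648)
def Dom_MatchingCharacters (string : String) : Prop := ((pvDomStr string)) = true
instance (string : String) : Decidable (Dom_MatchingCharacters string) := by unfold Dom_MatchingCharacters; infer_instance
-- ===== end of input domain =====

-- B replaces A's scan over every pair of equal characters by one first/last-occurrence pass per
-- distinct character (the widest pair dominates); objective: faster.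

-- ===== PORT A =====

-- len(set(string[lo:hi])) — shared by both sources, which both contain this exact expression
def pvLenSet (s : List Char) (lo hi : Int) : Int :=
  ((PySem.Set.ofList (PySem.List.slice s (some lo) (some hi))).length : Int)

-- exact port of string.index(c, start) for a single character c and 0 ≤ start:
-- first index ≥ start holding c; none = ValueError
def pvIndexFrom (s : List Char) (c : Char) (start : Nat) : Option Nat :=
  (PySem.List.index? (s.drop start) c).map (· + start)

theorem pvIndexFrom_some {s : List Char} {c : Char} {start j : Nat}
    (h : pvIndexFrom s c start = some j) :
    start ≤ j ∧ j < s.length ∧ s[j]? = some c ∧ ∀ k, start ≤ k → k < j → s[k]? ≠ some c := by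
  unfold pvIndexFrom at h
  rcases Option.map_eq_some_iff.mp h with ⟨k, hk, rfl⟩
  obtain ⟨hlt, hget, hmin⟩ := PySem.List.getElem_of_index?_eq_some hk
  have hlen : k + start < s.length := by
    have := List.length_drop (l := s) (i := start) ▸ hlt
    omega
  refine ⟨by omega, hlen, ?_, ?_⟩
  · have hd : (s.drop start)[k] = s[start + k]'(by omega) := List.getElem_drop
    rw [List.getElem?_eq_getElem (by omega : k + start < s.length)]
    have : s[start + k]'(by omega) = s[k + start]'(by omega) := by
      congr 1; omega
    rw [← this, ← hd, hget]
  · intro m hm1 hm2 hmem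
    have hmlen : m < s.length := by omega
    have hne := hmin (m - start) (by omega : m - start < k)
    rw [List.getElem_drop] at hne
    simp only [show start + (m - start) = m from by omega] at hne
    apply hne
    rw [List.getElem?_eq_getElem hmlen] at hmem
    exact Option.some_injective _ hmem

-- the 'while True: try: string.index … except: break' loop of A
def pvAInner (s : List Char) (c : Char) (ind : Nat) (curr : Nat) (cnt : List Int) : List Int :=
  match h : pvIndexFrom s c curr with
  | none => cnt
  | some j =>
      pvAInner s c ind (j + 1) (cnt ++ [pvLenSet s ((ind : Int) + 1) (j : Int)])
termination_by s.length - curr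
decreasing_by
  have := pvIndexFrom_some h
  omega

def MatchingCharacters (string : String) : Int :=
  let s := string.toList
  let cnt := (PySem.List.enumerate s 0).foldl
    (fun cnt p => pvAInner s p.2 p.1.toNat (p.1.toNat + 1) cnt) [0]
  -- cnt starts as [0] and only grows, so max? is always some; getD 0 is never the default
  (PySem.List.max? cnt (fun x => x)).getD 0

-- ===== PORT B =====

-- first/last occurrence index of every distinct character (the dict fl of Source B)
def pvFirstLast (s : List Char) : PySem.Dict Char (Int × Int) :=
  (PySem.List.enumerate s 0).foldl
    (fun d p =>
      match PySem.Dict.get? d p.2 with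
      | some q => PySem.Dict.insert d p.2 (q.1, p.1)
      | none => PySem.Dict.insert d p.2 (p.1, p.1))
    PySem.Dict.empty

def MatchingCharacters_alt (string : String) : Int :=
  let s := string.toList
  (PySem.Dict.values (pvFirstLast s)).foldl
    (fun best q => if q.1 < q.2 then max best (pvLenSet s (q.1 + 1) q.2) else best) 0

-- ===== PRECONDITION & SPEC =====
def Spec_MatchingCharacters (string : String) (out : Int) : Prop := out = MatchingCharacters_alt string
instance (string : String) (out : Int) : Decidable (Spec_MatchingCharacters string out) := by unfold Spec_MatchingCharacters; infer_instance

-- ===== CLAIM (what is proved, stated in full; the proofs are below) =====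
def Claim_equal_MatchingCharacters : Prop := ∀ (string : String), Dom_MatchingCharacters string → Spec_MatchingCharacters string (MatchingCharacters string)

-- ===== LEMMAS AND PROOFS =====

-- distinct count strictly between positions i and j (natural-number form of pvLenSet)
def pvDC (s : List Char) (i j : Nat) : Nat :=
  (PySem.Set.ofList ((s.drop (i + 1)).take (j - (i + 1)))).length

theorem pvLenSet_eq_pvDC (s : List Char) (i j : Nat) :
    pvLenSet s ((i : Int) + 1) (j : Int) = (pvDC s i j : Int) := by
  unfold pvLenSet pvDC
  rw [show ((i : Int) + 1) = ((i + 1 : Nat) : Int) by push_cast; ring,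
    PySem.List.slice_natCast]

-- membership in the strictly-between slice, by absolute index
theorem pv_mem_between {s : List Char} {a b : Nat} {x : Char} :
    x ∈ (s.drop a).take (b - a) ↔ ∃ k, a ≤ k ∧ k < b ∧ s[k]? = some x := by
  rw [List.mem_iff_getElem]
  constructor
  · rintro ⟨m, hm, hx⟩
    have hlen : m < b - a ∧ m < s.length - a := by
      simpa [Nat.lt_min] using hm
    refine ⟨a + m, by omega, by omega, ?_⟩
    rw [List.getElem_take, List.getElem_drop] at hx
    rw [List.getElem?_eq_getElem (by omega), hx]
  · rintro ⟨k, h1, h2, hx⟩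
    have hk : k < s.length := by
      by_contra hk
      rw [List.getElem?_eq_none (by omega)] at hx
      simp at hx
    refine ⟨k - a, by simp [List.length_take, List.length_drop]; omega, ?_⟩
    rw [List.getElem_take, List.getElem_drop]
    simp only [show a + (k - a) = k from by omega]
    rw [List.getElem?_eq_getElem hk] at hx
    exact Option.some_injective _ hx

-- a list with fewer element values has the smaller distinct count
theorem pvSetLen_mono {xs ys : List Char} (h : ∀ x ∈ xs, x ∈ ys) :
    (PySem.Set.ofList xs).length ≤ (PySem.Set.ofList ys).length := by
  have hx : (PySem.Set.ofList xs).length = xs.toFinset.card := by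
    rw [← List.toFinset_card_of_nodup (PySem.Set.nodup_ofList xs)]
    congr 1
    ext a
    simp [PySem.Set.mem_ofList]
  have hy : (PySem.Set.ofList ys).length = ys.toFinset.card := by
    rw [← List.toFinset_card_of_nodup (PySem.Set.nodup_ofList ys)]
    congr 1
    ext a
    simp [PySem.Set.mem_ofList]
  rw [hx, hy]
  apply Finset.card_le_card
  intro a ha
  simp only [List.mem_toFinset] at *
  exact h a ha

-- the distinct count between a pair is at most the one between a wider pair
theorem pvDC_mono {s : List Char} {f i j l : Nat} (h1 : f ≤ i) (h2 : j ≤ l) :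
    pvDC s i j ≤ pvDC s f l := by
  unfold pvDC
  apply pvSetLen_mono
  intro x hx
  rcases pv_mem_between.mp hx with ⟨k, hk1, hk2, hk3⟩
  exact pv_mem_between.mpr ⟨k, by omega, by omega, hk3⟩

theorem pvIndexFrom_eq_none {s : List Char} {c : Char} {start : Nat}
    (h : pvIndexFrom s c start = none) :
    ∀ k, start ≤ k → k < s.length → s[k]? ≠ some c := by
  unfold pvIndexFrom at h
  rw [Option.map_eq_none_iff, PySem.List.index?_eq_none_iff] at h
  intro k hk1 hk2 hx
  apply h
  rw [List.mem_iff_getElem]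
  refine ⟨k - start, by rw [List.length_drop]; omega, ?_⟩
  rw [List.getElem_drop]
  simp only [show start + (k - start) = k from by omega]
  rw [List.getElem?_eq_getElem hk2] at hx
  exact Option.some_injective _ hx

theorem pvAInner_prefix (s : List Char) (c : Char) (ind curr : Nat) (cnt : List Int) :
    cnt <+: pvAInner s c ind curr cnt := by
  induction curr, cnt using pvAInner.induct s c ind with
  | case1 curr cnt h =>
    rw [pvAInner, h]
  | case2 curr cnt j h ih =>
    rw [pvAInner, h]
    exact (List.prefix_append _ _).trans ih

theorem pvAInner_mem {s : List Char} {c : Char} {ind curr : Nat} {cnt : List Int} {x : Int}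
    (h : x ∈ pvAInner s c ind curr cnt) :
    x ∈ cnt ∨ ∃ j, curr ≤ j ∧ j < s.length ∧ s[j]? = some c ∧
      x = pvLenSet s ((ind : Int) + 1) (j : Int) := by
  revert h
  induction curr, cnt using pvAInner.induct s c ind with
  | case1 curr cnt hnone =>
    rw [pvAInner, hnone]
    exact fun h => Or.inl h
  | case2 curr cnt j₀ hsome ih =>
    rw [pvAInner, hsome]
    intro h
    obtain ⟨hle, hlt, hat, -⟩ := pvIndexFrom_some hsome
    rcases ih h with h' | ⟨j', h1, h2, h3, h4⟩
    · rcases List.mem_append.mp h' with h'' | h''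
      · exact Or.inl h''
      · rcases List.mem_singleton.mp h'' with rfl
        exact Or.inr ⟨j₀, hle, hlt, hat, rfl⟩
    · exact Or.inr ⟨j', by omega, h2, h3, h4⟩

theorem pvAInner_covers {s : List Char} {c : Char} {ind curr : Nat} (cnt : List Int) {j : Nat}
    (h1 : curr ≤ j) (h2 : j < s.length) (h3 : s[j]? = some c) :
    pvLenSet s ((ind : Int) + 1) (j : Int) ∈ pvAInner s c ind curr cnt := by
  revert h1
  induction curr, cnt using pvAInner.induct s c ind with
  | case1 curr cnt hnone =>
    intro h1
    exact absurd h3 (pvIndexFrom_eq_none hnone j h1 h2)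
  | case2 curr cnt j₀ hsome ih =>
    intro h1
    obtain ⟨hle, hlt, hat, hmin⟩ := pvIndexFrom_some hsome
    rw [pvAInner, hsome]
    by_cases hj : j = j₀
    · subst hj
      exact (pvAInner_prefix s c ind (j + 1) _).mem
        (List.mem_append.mpr (Or.inr (List.mem_singleton.mpr rfl)))
    · have : j₀ < j := by
        rcases Nat.lt_or_ge j j₀ with hlt' | hge
        · exact absurd h3 (hmin j h1 hlt')
        · omega
      exact ih (by omega)

-- the body of A's outer loop
def pvF (s : List Char) : List Int → (Int × Char) → List Int :=
  fun cnt p => pvAInner s p.2 p.1.toNat (p.1.toNat + 1) cnt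

theorem pvF_prefix (s : List Char) (l : List (Int × Char)) (cnt : List Int) :
    cnt <+: l.foldl (pvF s) cnt := by
  induction l generalizing cnt with
  | nil => exact List.prefix_refl cnt
  | cons p t ih =>
    exact (pvAInner_prefix s p.2 p.1.toNat (p.1.toNat + 1) cnt).trans (ih _)

theorem pvF_mem {s : List Char} {l : List (Int × Char)} {cnt : List Int} {x : Int}
    (h : x ∈ l.foldl (pvF s) cnt) :
    x ∈ cnt ∨ ∃ p ∈ l, ∃ j, p.1.toNat + 1 ≤ j ∧ j < s.length ∧ s[j]? = some p.2 ∧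
      x = pvLenSet s ((p.1.toNat : Int) + 1) (j : Int) := by
  induction l generalizing cnt with
  | nil => exact Or.inl h
  | cons p t ih =>
    rcases ih h with h' | ⟨p', hp', rest⟩
    · rcases pvAInner_mem h' with h'' | ⟨j, hj1, hj2, hj3, hj4⟩
      · exact Or.inl h''
      · exact Or.inr ⟨p, List.mem_cons_self, j, hj1, hj2, hj3, hj4⟩
    · exact Or.inr ⟨p', List.mem_cons_of_mem p hp', rest⟩

theorem pvF_covers {s : List Char} {l : List (Int × Char)} (cnt : List Int) {p : Int × Char}
    (hp : p ∈ l) {j : Nat} (h1 : p.1.toNat + 1 ≤ j) (h2 : j < s.length)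
    (h3 : s[j]? = some p.2) :
    pvLenSet s ((p.1.toNat : Int) + 1) (j : Int) ∈ l.foldl (pvF s) cnt := by
  induction l generalizing cnt with
  | nil => exact absurd hp (List.not_mem_nil)
  | cons p' t ih =>
    rcases List.mem_cons.mp hp with rfl | hmem
    · exact (pvF_prefix s t _).mem (pvAInner_covers cnt h1 h2 h3)
    · exact ih _ hmem

-- the body of B's dict-building loop
def pvG : PySem.Dict Char (Int × Int) → (Int × Char) → PySem.Dict Char (Int × Int) :=
  fun d p =>
    match PySem.Dict.get? d p.2 with
    | some q => PySem.Dict.insert d p.2 (q.1, p.1)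
    | none => PySem.Dict.insert d p.2 (p.1, p.1)

-- invariant of B's dict: each entry is (first, last) occurrence of its key
def pvGood (s : List Char) (d : PySem.Dict Char (Int × Int)) : Prop :=
  d.keys.Nodup ∧
  (∀ (k : Nat) (c : Char), s[k]? = some c → (PySem.Dict.get? d c).isSome = true) ∧
  (∀ (c : Char) (q : Int × Int), PySem.Dict.get? d c = some q →
    ∃ f l : Nat, q = ((f : Int), (l : Int)) ∧ s[f]? = some c ∧ s[l]? = some c ∧
      ∀ k : Nat, s[k]? = some c → f ≤ k ∧ k ≤ l)

-- getElem? = some for an index in range means the index is in range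
theorem pv_lt_of_get {s : List Char} {k : Nat} {x : Char} (h : s[k]? = some x) :
    k < s.length := by
  by_contra hk
  rw [List.getElem?_eq_none (by omega)] at h
  simp at h

-- positions of a one-longer list
theorem pv_append_get {s : List Char} {c x : Char} {k : Nat} (h : (s ++ [c])[k]? = some x) :
    (k < s.length ∧ s[k]? = some x) ∨ (k = s.length ∧ x = c) := by
  by_cases hk : k < s.length
  · exact Or.inl ⟨hk, by rwa [List.getElem?_append_left hk] at h⟩
  · right
    have hk2 : k < s.length + 1 := by
      have := pv_lt_of_get h
      simpa using this
    have hkk : k = s.length := by omega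
    subst hkk
    rw [List.getElem?_concat_length] at h
    exact ⟨rfl, (Option.some_injective _ h).symm⟩

theorem pv_append_get_left {s : List Char} {c x : Char} {k : Nat} (h : s[k]? = some x) :
    (s ++ [c])[k]? = some x := by
  rwa [List.getElem?_append_left (pv_lt_of_get h)]

theorem pvFirstLast_append (s : List Char) (c : Char) :
    pvFirstLast (s ++ [c]) = pvG (pvFirstLast s) (((s.length : Nat) : Int), c) := by
  show (PySem.List.enumerate (s ++ [c]) 0).foldl pvG PySem.Dict.empty = _
  rw [PySem.List.enumerate_append, List.foldl_append]
  simp [PySem.List.enumerate_cons, PySem.List.enumerate_nil]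
  rfl

theorem pvGood_step {s : List Char} {d : PySem.Dict Char (Int × Int)} {c : Char}
    (hg : pvGood s d) : pvGood (s ++ [c]) (pvG d ((s.length : Int), c)) := by
  obtain ⟨hnd, hcov, hent⟩ := hg
  unfold pvG
  cases hq : PySem.Dict.get? d c with
  | none =>
    refine ⟨PySem.Dict.nodup_keys_insert _ _ _ hnd, ?_, ?_⟩
    · intro k c' hk
      rw [PySem.Dict.get?_insert]
      rcases pv_append_get hk with ⟨hk1, hk2⟩ | ⟨hk1, rfl⟩
      · split_ifs with he
        · rfl
        · exact hcov k c' hk2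
      · simp
    · intro c' q hq'
      rw [PySem.Dict.get?_insert] at hq'
      split_ifs at hq' with he
      · subst he
        rcases Option.some_injective _ hq' with rfl
        refine ⟨s.length, s.length, rfl, by rw [List.getElem?_concat_length],
          by rw [List.getElem?_concat_length], ?_⟩
        intro k hk
        rcases pv_append_get hk with ⟨hk1, hk2⟩ | ⟨rfl, -⟩
        · have := hcov k c' hk2
          rw [hq] at this
          simp at this
        · omega
      · obtain ⟨f, l, rfl, hf, hl, hbnd⟩ := hent c' q hq'
        refine ⟨f, l, rfl, pv_append_get_left hf, pv_append_get_left hl, ?_⟩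
        intro k hk
        rcases pv_append_get hk with ⟨hk1, hk2⟩ | ⟨rfl, rfl⟩
        · exact hbnd k hk2
        · exact absurd rfl he
  | some q =>
    obtain ⟨f, l, rfl, hf, hl, hbnd⟩ := hent c q hq
    refine ⟨PySem.Dict.nodup_keys_insert _ _ _ hnd, ?_, ?_⟩
    · intro k c' hk
      rw [PySem.Dict.get?_insert]
      rcases pv_append_get hk with ⟨hk1, hk2⟩ | ⟨hk1, rfl⟩
      · split_ifs with he
        · rfl
        · exact hcov k c' hk2
      · simp
    · intro c' q' hq'
      rw [PySem.Dict.get?_insert] at hq'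
      split_ifs at hq' with he
      · subst he
        rcases Option.some_injective _ hq' with rfl
        refine ⟨f, s.length, rfl, pv_append_get_left hf,
          by rw [List.getElem?_concat_length], ?_⟩
        have hflt : f < s.length := pv_lt_of_get hf
        intro k hk
        rcases pv_append_get hk with ⟨hk1, hk2⟩ | ⟨rfl, -⟩
        · have := hbnd k hk2
          omega
        · omega
      · obtain ⟨f', l', rfl, hf', hl', hbnd'⟩ := hent c' q' hq'
        refine ⟨f', l', rfl, pv_append_get_left hf', pv_append_get_left hl', ?_⟩
        intro k hk
        rcases pv_append_get hk with ⟨hk1, hk2⟩ | ⟨rfl, rfl⟩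
        · exact hbnd' k hk2
        · exact absurd rfl he

theorem pvGood_firstLast (s : List Char) : pvGood s (pvFirstLast s) := by
  induction s using List.reverseRecOn with
  | nil =>
    refine ⟨by simp [pvFirstLast, PySem.List.enumerate_nil, PySem.Dict.keys_empty], ?_, ?_⟩
    · intro k c hk
      simp at hk
    · intro c q hq
      simp [pvFirstLast, PySem.List.enumerate_nil, PySem.Dict.get?_empty] at hq
  | append_singleton t c ih =>
    rw [pvFirstLast_append]
    exact pvGood_step ih

-- values of a nodup-keyed dict are exactly the looked-up entries
theorem pv_values_iff {d : PySem.Dict Char (Int × Int)} (hnd : d.keys.Nodup) (q : Int × Int) :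
    q ∈ d.values ↔ ∃ c, PySem.Dict.get? d c = some q := by
  rw [PySem.Dict.values_eq_map_keys d hnd (0, 0)]
  constructor
  · intro hq
    rcases List.mem_map.mp hq with ⟨c, hc, hcq⟩
    cases hget : PySem.Dict.get? d c with
    | none =>
      rw [PySem.Dict.get?_eq_none_iff_not_mem_keys] at hget
      exact absurd hc hget
    | some q' =>
      have hqq : q = q' := by
        rw [← hcq, PySem.Dict.getD_of_get?_eq_some _ _ hget]
      exact ⟨c, by rw [hget, hqq]⟩
  · rintro ⟨c, hc⟩
    apply List.mem_map.mpr
    refine ⟨c, ?_, PySem.Dict.getD_of_get?_eq_some _ _ hc⟩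
    by_contra hmem
    rw [← PySem.Dict.get?_eq_none_iff_not_mem_keys] at hmem
    rw [hmem] at hc
    simp at hc

-- the body of B's max loop
def pvStep (s : List Char) : Int → (Int × Int) → Int :=
  fun best q => if q.1 < q.2 then max best (pvLenSet s (q.1 + 1) q.2) else best

theorem pvStep_ge_init (s : List Char) (l : List (Int × Int)) (b : Int) :
    b ≤ l.foldl (pvStep s) b := by
  induction l generalizing b with
  | nil => exact le_refl b
  | cons q t ih =>
    refine le_trans ?_ (ih (pvStep s b q))
    unfold pvStep
    split_ifs
    · exact le_max_left _ _
    · exact le_refl b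

theorem pvStep_ge_mem {s : List Char} {l : List (Int × Int)} {q : Int × Int} (hq : q ∈ l)
    (hlt : q.1 < q.2) (b : Int) :
    pvLenSet s (q.1 + 1) q.2 ≤ l.foldl (pvStep s) b := by
  induction l generalizing b with
  | nil => exact absurd hq (List.not_mem_nil)
  | cons q' t ih =>
    rcases List.mem_cons.mp hq with rfl | hmem
    · refine le_trans ?_ (pvStep_ge_init s t (pvStep s b q))
      unfold pvStep
      rw [if_pos hlt]
      exact le_max_right _ _
    · exact ih hmem _

theorem pvStep_le {s : List Char} {l : List (Int × Int)} {b m : Int} (hb : b ≤ m)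
    (h : ∀ q ∈ l, q.1 < q.2 → pvLenSet s (q.1 + 1) q.2 ≤ m) :
    l.foldl (pvStep s) b ≤ m := by
  induction l generalizing b with
  | nil => exact hb
  | cons q t ih =>
    refine ih ?_ (fun q' hq' => h q' (List.mem_cons_of_mem q hq'))
    unfold pvStep
    split_ifs with hc
    · exact max_le hb (h q List.mem_cons_self hc)
    · exact hb

-- A's value is the max over all equal pairs; B keeps, per character, only the widest pair,
-- which dominates by pvDC_mono — so the two maxima coincide.
theorem pv_main (s : List Char) :
    (PySem.List.max? ((PySem.List.enumerate s 0).foldl (pvF s) [0]) (fun x => x)).getD 0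
      = (PySem.Dict.values (pvFirstLast s)).foldl (pvStep s) 0 := by
  obtain ⟨rest, hrest⟩ := pvF_prefix s (PySem.List.enumerate s 0) [0]
  set cnt := (PySem.List.enumerate s 0).foldl (pvF s) [0] with hcnt
  have hcons : cnt = 0 :: rest := hrest.symm
  have hm : PySem.List.max? cnt (fun x => x) = some (rest.foldl max 0) := by
    rw [hcons]; exact PySem.List.max?_id_cons (0 : Int) rest
  set m := rest.foldl max 0 with hmdef
  rw [hm]
  show m = _
  have hmem : m ∈ cnt := PySem.List.max?_mem hm
  have hismax : ∀ y ∈ cnt, y ≤ m := fun y hy => PySem.List.max?_isMax hm y hy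
  have h0 : (0 : Int) ∈ cnt := by rw [hcons]; exact List.mem_cons_self
  obtain ⟨hnd, hcov, hent⟩ := pvGood_firstLast s
  set resB := (PySem.Dict.values (pvFirstLast s)).foldl (pvStep s) 0 with hresB
  apply le_antisymm
  · -- m ≤ resB
    rcases pvF_mem hmem with h' | ⟨p, hp, j, hj1, hj2, hj3, hx⟩
    · have hm0 : m = 0 := List.mem_singleton.mp h'
      rw [hm0]
      exact pvStep_ge_init s _ 0
    · rcases (PySem.List.mem_enumerate_iff _ _ _).mp hp with ⟨k, hk, rfl⟩
      simp only [zero_add, Int.toNat_natCast] at hj1 hj3 hx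
      have hkx : s[k]? = some s[k] := List.getElem?_eq_getElem hk
      have hq0 := hcov k s[k] hkx
      cases hq : PySem.Dict.get? (pvFirstLast s) s[k] with
      | none => rw [hq] at hq0; simp at hq0
      | some q =>
        obtain ⟨f, l, rfl, hf, hl, hbnd⟩ := hent s[k] q hq
        obtain ⟨hfk, hkl⟩ := hbnd k hkx
        obtain ⟨hfj, hjl⟩ := hbnd j hj3
        have hqv : ((f : Int), (l : Int)) ∈ PySem.Dict.values (pvFirstLast s) :=
          (pv_values_iff hnd _).mpr ⟨s[k], hq⟩
        have hlt : ((f : Int), (l : Int)).1 < ((f : Int), (l : Int)).2 := by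
          show (f : Int) < (l : Int)
          exact_mod_cast show f < l by omega
        calc m = pvLenSet s ((k : Int) + 1) (j : Int) := hx
          _ = (pvDC s k j : Int) := pvLenSet_eq_pvDC s k j
          _ ≤ (pvDC s f l : Int) := by exact_mod_cast pvDC_mono hfk hjl
          _ = pvLenSet s ((f : Int) + 1) (l : Int) := (pvLenSet_eq_pvDC s f l).symm
          _ ≤ resB := pvStep_ge_mem hqv hlt 0
  · -- resB ≤ m
    apply pvStep_le (hismax 0 h0)
    intro q hq hqlt
    rcases (pv_values_iff hnd q).mp hq with ⟨c, hc⟩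
    obtain ⟨f, l, rfl, hf, hl, hbnd⟩ := hent c _ hc
    have hfl : f < l := by simpa using hqlt
    have hflen : f < s.length := pv_lt_of_get hf
    have hllen : l < s.length := pv_lt_of_get hl
    have hfc : s[f] = c := by
      rw [List.getElem?_eq_getElem hflen] at hf
      exact Option.some_injective _ hf
    have hpmem : ((f : Int), c) ∈ PySem.List.enumerate s 0 := by
      apply (PySem.List.mem_enumerate_iff _ _ _).mpr
      exact ⟨f, hflen, by rw [zero_add, hfc]⟩
    have hin := pvF_covers [0] hpmem (p := ((f : Int), c)) (j := l)
      (by simp; omega) hllen (by simpa using hl)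
    simp only [Int.toNat_natCast] at hin
    exact hismax _ hin

-- ===== VERDICT (by name: the statement is the Claim_ definition above) =====
theorem MatchingCharacters_spec : Claim_equal_MatchingCharacters := by
  unfold Claim_equal_MatchingCharacters Spec_MatchingCharacters
  intro string _
  show (PySem.List.max? ((PySem.List.enumerate string.toList 0).foldl (pvF string.toList) [0])
      (fun x => x)).getD 0
    = (PySem.Dict.values (pvFirstLast string.toList)).foldl (pvStep string.toList) 0
  exact pv_main string.toList
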